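-- pv_equiv track=rewrite | github.com/pypi-data/pypi-mirror-224 | packages/tketool.pt/tketool.pt-0.3.15-py3-none-any.whl/ml_util/MetricsBase.py | confusion_dic_2_matrix
-- ===== SOURCE A (Python) =====
-- def confusion_dic_2_matrix(confusion_dic: {}):
--     key_dict = {}
--     index = 0
--     for l in confusion_dic.keys():
--         for v in confusion_dic[l].keys():
--             if v not in key_dict:
--                 key_dict[v] = index
--                 index += 1
--         if l not in key_dict:
--             key_dict[l] = index
--             index += 1
--
--     key_count = len(key_dict.keys())
--     matrix = [[0 for _ in range(key_count)] for __ in range(key_count)]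
--
--     for l in confusion_dic.keys():
--         yy = key_dict[l]
--         for v in confusion_dic[l].keys():
--             xx = key_dict[v]
--             matrix[xx][yy] += 1
--
--     return matrix
-- ===== SOURCE B (Python) =====
-- def confusion_dic_2_matrix(confusion_dic: {}):
--     # same index assignment as the original (inner keys first, then the outer key)
--     key_dict = {}
--     index = 0
--     for l in confusion_dic.keys():
--         for v in confusion_dic[l].keys():
--             if v not in key_dict:
--                 key_dict[v] = index
--                 index += 1
--         if l not in key_dict:
--             key_dict[l] = index
--             index += 1
--
--     idx_to_key = list(key_dict)  # insertion order == index order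
--     # grid-driven gather: each cell is 1 iff the (column-key, row-key) edge exists
--     return [[1 if kj in confusion_dic and ki in confusion_dic[kj] else 0
--              for kj in idx_to_key]
--             for ki in idx_to_key]
-- ===== Notes on version B (the rewrite author's own statement) =====
-- stated objective: alternative
-- what changed: Replaces the data-driven scatter (allocate a zero matrix, then += along every (outer-key, inner-key) edge) with a grid-driven gather: the index-to-key list is read back from key_dict and each cell is computed directly by two membership tests.
import Mathlib
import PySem

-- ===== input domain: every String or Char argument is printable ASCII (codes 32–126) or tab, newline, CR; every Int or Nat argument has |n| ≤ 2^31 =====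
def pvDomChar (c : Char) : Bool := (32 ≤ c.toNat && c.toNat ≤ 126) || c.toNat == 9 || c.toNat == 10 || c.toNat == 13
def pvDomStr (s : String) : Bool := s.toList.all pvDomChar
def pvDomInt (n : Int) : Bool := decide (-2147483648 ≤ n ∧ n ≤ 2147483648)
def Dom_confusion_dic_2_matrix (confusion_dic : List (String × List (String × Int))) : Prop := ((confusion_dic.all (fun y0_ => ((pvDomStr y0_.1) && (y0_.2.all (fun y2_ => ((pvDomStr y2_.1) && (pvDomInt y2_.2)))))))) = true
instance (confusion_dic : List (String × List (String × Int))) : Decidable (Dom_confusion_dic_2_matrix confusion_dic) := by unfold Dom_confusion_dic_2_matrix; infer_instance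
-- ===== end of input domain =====

-- B changes only the matrix-filling strategy (grid-driven gather via membership tests instead of
-- the data-driven scatter with +=1); the index-assignment loop is deliberately kept identical.

-- ===== PORT A =====
-- the first loop of BOTH Pythons (A and B share it verbatim): assign an index to every inner key
-- of each outer key, then to the outer key itself; 'if k not in key_dict: key_dict[k] = index; index += 1'
def pvAddKey (st : PySem.Dict String Int × Int) (k : String) : PySem.Dict String Int × Int :=
  if st.1.contains k then st else (st.1.insert k st.2, st.2 + 1)

-- under Pre_ the outer keys are distinct, so 'for l in confusion_dic.keys(): … confusion_dic[l] …'
-- is exactly a fold over the association list's entries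
def pvBuildKeyDict (confusion_dic : List (String × List (String × Int))) : PySem.Dict String Int :=
  (confusion_dic.foldl
    (fun st lrow => pvAddKey (lrow.2.foldl (fun st vp => pvAddKey st vp.1) st) lrow.1)
    (PySem.Dict.empty, 0)).1

def confusion_dic_2_matrix (confusion_dic : List (String × List (String × Int))) : List (List Int) :=
  let key_dict := pvBuildKeyDict confusion_dic
  let key_count := key_dict.keys.length
  let matrix := List.replicate key_count (List.replicate key_count (0 : Int))
  -- scatter: matrix[xx][yy] += 1 for every (outer l, inner v); key_dict[l] never raises (l was inserted)
  confusion_dic.foldl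
    (fun m lrow =>
      let yy := key_dict.getD lrow.1 0
      lrow.2.foldl
        (fun m vp =>
          let xx := key_dict.getD vp.1 0
          PySem.List.pySetD m xx
            (PySem.List.pySetD (PySem.List.pyGetD m xx []) yy
              (PySem.List.pyGetD (PySem.List.pyGetD m xx []) yy 0 + 1))) m)
    matrix

-- ===== PORT B =====
def confusion_dic_2_matrix_alt (confusion_dic : List (String × List (String × Int))) : List (List Int) :=
  let key_dict := pvBuildKeyDict confusion_dic
  let idx_to_key := key_dict.keys
  -- gather: cell (i, j) is 1 iff key j is an outer key whose row contains key i
  idx_to_key.map (fun ki =>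
    idx_to_key.map (fun kj =>
      match (PySem.Dict.mk confusion_dic).get? kj with
      | some row => if (PySem.Dict.mk row).contains ki then (1 : Int) else 0
      | none => 0))

-- ===== PRECONDITION & SPEC =====
-- Pre_ excludes association lists with duplicate outer keys or duplicate inner keys within one
-- row: such lists do not represent a Python dict (the duplicate entries would have collapsed).
def Pre_confusion_dic_2_matrix (confusion_dic : List (String × List (String × Int))) : Prop :=
  (confusion_dic.map Prod.fst).Nodup ∧ ∀ p ∈ confusion_dic, (p.2.map Prod.fst).Nodup
instance (confusion_dic : List (String × List (String × Int))) : Decidable (Pre_confusion_dic_2_matrix confusion_dic) := by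
  unfold Pre_confusion_dic_2_matrix; infer_instance

def pvWitness_confusion_dic_2_matrix : (List (String × List (String × Int))) :=
  ([("a", [("b", 1)])])

def Spec_confusion_dic_2_matrix (confusion_dic : List (String × List (String × Int))) (out : List (List Int)) : Prop := out = confusion_dic_2_matrix_alt confusion_dic
instance (confusion_dic : List (String × List (String × Int))) (out : List (List Int)) : Decidable (Spec_confusion_dic_2_matrix confusion_dic out) := by unfold Spec_confusion_dic_2_matrix; infer_instance

-- ===== CLAIM (what is proved, stated in full; the proofs are below) =====
def Claim_equal_confusion_dic_2_matrix : Prop := ∀ (confusion_dic : List (String × List (String × Int))), Dom_confusion_dic_2_matrix confusion_dic → Pre_confusion_dic_2_matrix confusion_dic → Spec_confusion_dic_2_matrix confusion_dic (confusion_dic_2_matrix confusion_dic)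

-- ===== LEMMAS AND PROOFS =====

-- abstract model of the shared index-assignment loop -----------------------------------------

/-- the association list [(K[0], n), (K[1], n+1), …] -/
def pvNumFrom : Nat → List String → List (String × Int)
  | _, [] => []
  | n, k :: K => (k, (n : Int)) :: pvNumFrom (n + 1) K

/-- ordered insert-if-absent on the key list -/
def pvAddS (K : List String) (k : String) : List String := if k ∈ K then K else K ++ [k]

def pvRowKeys (K : List String) (row : List (String × Int)) : List String :=
  row.foldl (fun K vp => pvAddS K vp.1) K

def pvKeysOf (confusion_dic : List (String × List (String × Int))) : List String :=
  confusion_dic.foldl (fun K lrow => pvAddS (pvRowKeys K lrow.2) lrow.1) []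

theorem pvNumFrom_map_fst (n : Nat) (K : List String) : (pvNumFrom n K).map Prod.fst = K := by
  induction K generalizing n with
  | nil => rfl
  | cons k K ih => simp [pvNumFrom, ih]

theorem pvNumFrom_append (n : Nat) (K : List String) (k : String) :
    pvNumFrom n (K ++ [k]) = pvNumFrom n K ++ [(k, ((n + K.length : Nat) : Int))] := by
  induction K generalizing n with
  | nil => simp [pvNumFrom]
  | cons a K ih => simp [pvNumFrom, ih]; ring_nf

theorem pvGet?_numFrom (n : Nat) (K : List String) (x : String) :
    (PySem.Dict.mk (pvNumFrom n K)).get? x =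
      if x ∈ K then some ((n + K.idxOf x : Nat) : Int) else none := by
  induction K generalizing n with
  | nil => simp [pvNumFrom, PySem.Dict.get?]
  | cons k K ih =>
      by_cases hk : k = x
      · subst hk
        simp [pvNumFrom, PySem.Dict.get?_mk_cons]
      · simp [pvNumFrom, PySem.Dict.get?_mk_cons, hk, ih (n + 1),
          Ne.symm hk]
        split
        · ring_nf
        · rfl

theorem pvKeys_numFrom (n : Nat) (K : List String) :
    (PySem.Dict.mk (pvNumFrom n K)).keys = K := by
  simpa [PySem.Dict.keys] using pvNumFrom_map_fst n K

theorem pvAddKey_num (K : List String) (k : String) :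
    pvAddKey (PySem.Dict.mk (pvNumFrom 0 K), (K.length : Int)) k =
      (PySem.Dict.mk (pvNumFrom 0 (pvAddS K k)), ((pvAddS K k).length : Int)) := by
  have hc : (PySem.Dict.mk (pvNumFrom 0 K)).contains k = decide (k ∈ K) := by
    rw [PySem.Dict.contains_eq_decide_mem_keys, pvKeys_numFrom]
  by_cases hk : k ∈ K
  · simp [pvAddKey, hc, hk, pvAddS]
  · have hins : (PySem.Dict.mk (pvNumFrom 0 K)).insert k (K.length : Int) =
        PySem.Dict.mk (pvNumFrom 0 (K ++ [k])) := by
      apply PySem.Dict.ext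
      rw [PySem.Dict.items_insert_of_not_contains _ _ (by simp [hc, hk])]
      simp [pvNumFrom_append]
    simp [pvAddKey, hc, hk, pvAddS, hins]

theorem pvRow_build (row : List (String × Int)) (K : List String) :
    row.foldl (fun st vp => pvAddKey st vp.1) (PySem.Dict.mk (pvNumFrom 0 K), (K.length : Int)) =
      (PySem.Dict.mk (pvNumFrom 0 (pvRowKeys K row)), ((pvRowKeys K row).length : Int)) := by
  induction row generalizing K with
  | nil => rfl
  | cons vp row ih => rw [pvRowKeys, List.foldl_cons, pvAddKey_num, ih]; rfl

theorem pvBuild_eq (cd : List (String × List (String × Int))) :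
    pvBuildKeyDict cd = PySem.Dict.mk (pvNumFrom 0 (pvKeysOf cd)) := by
  have main : ∀ (cd : List (String × List (String × Int))) (K : List String),
      cd.foldl (fun st lrow => pvAddKey (lrow.2.foldl (fun st vp => pvAddKey st vp.1) st) lrow.1)
        (PySem.Dict.mk (pvNumFrom 0 K), (K.length : Int)) =
      (PySem.Dict.mk (pvNumFrom 0 (cd.foldl (fun K lrow => pvAddS (pvRowKeys K lrow.2) lrow.1) K)),
        ((cd.foldl (fun K lrow => pvAddS (pvRowKeys K lrow.2) lrow.1) K).length : Int)) := by
    intro cd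
    induction cd with
    | nil => intro K; rfl
    | cons lrow cd ih =>
        intro K
        rw [List.foldl_cons, pvRow_build, pvAddKey_num, ih, List.foldl_cons]
  have h0 : (PySem.Dict.empty : PySem.Dict String Int) = PySem.Dict.mk (pvNumFrom 0 []) := rfl
  rw [pvBuildKeyDict, h0]
  have := main cd []
  rw [show ((([] : List String).length : Int)) = 0 from rfl] at this
  rw [this]
  rfl

theorem pvAddS_nodup {K : List String} (h : K.Nodup) (k : String) : (pvAddS K k).Nodup := by
  unfold pvAddS; split
  · exact h
  · rename_i hk
    simp [List.nodup_append, h]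
    exact fun a ha hak => hk (hak ▸ ha)

theorem pvAddS_sub {K : List String} (k : String) : K ⊆ pvAddS K k := by
  unfold pvAddS; split <;> simp

theorem pvAddS_mem (K : List String) (k : String) : k ∈ pvAddS K k := by
  unfold pvAddS; split <;> simp_all

theorem pvRowKeys_nodup {K : List String} (h : K.Nodup) (row : List (String × Int)) :
    (pvRowKeys K row).Nodup := by
  induction row generalizing K with
  | nil => exact h
  | cons vp row ih => exact ih (pvAddS_nodup h vp.1)

theorem pvRowKeys_sub (K : List String) (row : List (String × Int)) : K ⊆ pvRowKeys K row := by
  induction row generalizing K with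
  | nil => exact fun _ h => h
  | cons vp row ih =>
      exact fun x hx => ih (pvAddS K vp.1) (pvAddS_sub vp.1 hx)

theorem pvRowKeys_mem (K : List String) (row : List (String × Int)) {v : String}
    (hv : v ∈ row.map Prod.fst) : v ∈ pvRowKeys K row := by
  induction row generalizing K with
  | nil => simp at hv
  | cons vp row ih =>
      simp only [List.map_cons, List.mem_cons] at hv
      rcases hv with h | h
      · exact pvRowKeys_sub _ row (h ▸ pvAddS_mem K vp.1)
      · exact ih (pvAddS K vp.1) (by simpa using h)

theorem pvKeysOf_nodup (cd : List (String × List (String × Int))) : (pvKeysOf cd).Nodup := by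
  have main : ∀ (cd : List (String × List (String × Int))) (K : List String), K.Nodup →
      (cd.foldl (fun K lrow => pvAddS (pvRowKeys K lrow.2) lrow.1) K).Nodup := by
    intro cd
    induction cd with
    | nil => exact fun K h => h
    | cons lrow cd ih =>
        intro K h
        exact ih _ (pvAddS_nodup (pvRowKeys_nodup h lrow.2) lrow.1)
  exact main cd [] (by simp)

-- every outer key and every inner key occurs in pvKeysOf
theorem pvKeysOf_mem_outer {cd : List (String × List (String × Int))} {l : String}
    (h : l ∈ cd.map Prod.fst) : l ∈ pvKeysOf cd := by
  have mono : ∀ (cd : List (String × List (String × Int))) (K : List String),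
      K ⊆ cd.foldl (fun K lrow => pvAddS (pvRowKeys K lrow.2) lrow.1) K := by
    intro cd
    induction cd with
    | nil => exact fun K _ h => h
    | cons lrow cd ih =>
        exact fun K x hx => ih _ (pvAddS_sub lrow.1 (pvRowKeys_sub K lrow.2 hx))
  have main : ∀ (cd : List (String × List (String × Int))) (K : List String),
      l ∈ cd.map Prod.fst →
      l ∈ cd.foldl (fun K lrow => pvAddS (pvRowKeys K lrow.2) lrow.1) K := by
    intro cd
    induction cd with
    | nil => intro K h; simp at h
    | cons lrow cd ih =>
        intro K h
        simp only [List.map_cons, List.mem_cons] at h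
        rcases h with h | h
        · exact mono cd _ (h ▸ pvAddS_mem _ lrow.1)
        · exact ih _ h
  exact main cd [] h

theorem pvKeysOf_mem_inner {cd : List (String × List (String × Int))}
    {p : String × List (String × Int)} (hp : p ∈ cd) {v : String}
    (hv : v ∈ p.2.map Prod.fst) : v ∈ pvKeysOf cd := by
  have mono : ∀ (cd : List (String × List (String × Int))) (K : List String),
      K ⊆ cd.foldl (fun K lrow => pvAddS (pvRowKeys K lrow.2) lrow.1) K := by
    intro cd
    induction cd with
    | nil => exact fun K _ h => h
    | cons lrow cd ih =>
        exact fun K x hx => ih _ (pvAddS_sub lrow.1 (pvRowKeys_sub K lrow.2 hx))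
  have main : ∀ (cd : List (String × List (String × Int))) (K : List String),
      p ∈ cd → v ∈ cd.foldl (fun K lrow => pvAddS (pvRowKeys K lrow.2) lrow.1) K := by
    intro cd
    induction cd with
    | nil => intro K h; simp at h
    | cons lrow cd ih =>
        intro K h
        rcases List.mem_cons.1 h with h | h
        · exact mono cd _ (pvAddS_sub lrow.1 (pvRowKeys_mem K lrow.2 (h ▸ hv)))
        · exact ih _ h
  exact main cd [] hp

-- matrix model --------------------------------------------------------------------------------

def pvMget (m : List (List Int)) (i j : Nat) : Int := (m.getD i []).getD j 0

def pvBump (x y : Nat) (m : List (List Int)) : List (List Int) :=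
  m.set x ((m.getD x []).set y ((m.getD x []).getD y 0 + 1))

def pvSc (ps : List (Nat × Nat)) (m : List (List Int)) : List (List Int) :=
  ps.foldl (fun m p => pvBump p.1 p.2 m) m

theorem pvBump_length (x y : Nat) (m : List (List Int)) : (pvBump x y m).length = m.length := by
  simp [pvBump]

theorem pvBump_row (x y : Nat) (m : List (List Int)) (i : Nat) :
    ((pvBump x y m).getD i []).length = (m.getD i []).length := by
  unfold pvBump
  rcases Nat.lt_or_ge x m.length with hx | hx
  · by_cases hix : i = x
    · subst hix
      simp [List.getD, hx]
    · simp [List.getD, Ne.symm hix]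
  · rw [List.set_eq_of_length_le hx]

theorem pvMget_bump (x y : Nat) (m : List (List Int)) (i j : Nat)
    (hx : x < m.length) (hy : y < (m.getD x []).length) :
    pvMget (pvBump x y m) i j = pvMget m i j + if i = x ∧ j = y then 1 else 0 := by
  unfold pvMget pvBump
  by_cases hix : i = x
  · subst hix
    simp only [List.getD, List.getElem?_set, hx, if_pos trivial]
    have hy' : y < (m[i]?.getD []).length := by simpa [List.getD] using hy
    by_cases hjy : j = y
    · subst hjy
      simp [hy']
    · simp [Ne.symm hjy, hjy]
  · simp [List.getD, Ne.symm hix, hix]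

theorem pvSc_length (ps : List (Nat × Nat)) (m : List (List Int)) :
    (pvSc ps m).length = m.length := by
  induction ps generalizing m with
  | nil => rfl
  | cons p ps ih => rw [pvSc, List.foldl_cons, ← pvSc, ih, pvBump_length]

theorem pvSc_row (ps : List (Nat × Nat)) (m : List (List Int)) (i : Nat) :
    ((pvSc ps m).getD i []).length = (m.getD i []).length := by
  induction ps generalizing m with
  | nil => rfl
  | cons p ps ih => rw [pvSc, List.foldl_cons, ← pvSc, ih, pvBump_row]

theorem pvSc_get (ps : List (Nat × Nat)) (m : List (List Int)) (i j : Nat)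
    (h : ∀ p ∈ ps, p.1 < m.length ∧ p.2 < (m.getD p.1 []).length) :
    pvMget (pvSc ps m) i j = pvMget m i j + ps.count (i, j) := by
  induction ps generalizing m with
  | nil => simp [pvSc]
  | cons p ps ih =>
      rw [pvSc, List.foldl_cons, ← pvSc, ih]
      · rw [pvMget_bump p.1 p.2 m i j (h p (by simp)).1 (h p (by simp)).2]
        rw [List.count_cons]
        cases p with
        | mk a b =>
          by_cases hij : i = a ∧ j = b
          · simp [hij]; omega
          · have : ¬ ((i, j) = (a, b)) := by simp [Prod.ext_iff]; tauto
            simp [hij]; omega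
      · intro q hq
        refine ⟨by rw [pvBump_length]; exact (h q (by simp [hq])).1, ?_⟩
        rw [pvBump_row]; exact (h q (by simp [hq])).2


-- counting layer ------------------------------------------------------------------------------

def pvPairs (K : List String) (cd : List (String × List (String × Int))) : List (Nat × Nat) :=
  cd.flatMap (fun lrow => lrow.2.map (fun vp => (K.idxOf vp.1, K.idxOf lrow.1)))

/-- what one cell of B's gather computes, as a Nat -/
def pvGath (cd : List (String × List (String × Int))) (K : List String) (i j : Nat) : Nat :=
  match (PySem.Dict.mk cd).get? (K.getD j "") with
  | some row => if (PySem.Dict.mk row).contains (K.getD i "") then 1 else 0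
  | none => 0


theorem pvIdx_eq {K : List String} {k : String} {i : Nat} (hi : i < K.length)
    (_hk : k ∈ K) (h : K.idxOf k = i) : k = K.getD i "" := by
  subst h
  rw [List.getD_eq_getElem K "" hi]
  exact (List.getElem_idxOf hi).symm

theorem pvRowCount_zero_snd {K : List String} (row : List (String × Int)) {i j y : Nat}
    (hy : y ≠ j) : (row.map (fun vp => (K.idxOf vp.1, y))).count (i, j) = 0 := by
  rw [List.count_eq_zero]
  intro hmem
  obtain ⟨vp, _, hp⟩ := List.mem_map.1 hmem
  exact hy (congrArg Prod.snd hp)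

theorem pvRowCount_zero_fst {K : List String} (_hK : K.Nodup) {i : Nat} (hi : i < K.length)
    (row : List (String × Int)) {j y : Nat}
    (hne : ∀ vp ∈ row, vp.1 ≠ K.getD i "") (hmem : ∀ vp ∈ row, vp.1 ∈ K) :
    (row.map (fun vp => (K.idxOf vp.1, y))).count (i, j) = 0 := by
  rw [List.count_eq_zero]
  intro hm
  obtain ⟨vp, hvp, hp⟩ := List.mem_map.1 hm
  exact hne vp hvp (pvIdx_eq hi (hmem vp hvp) (congrArg Prod.fst hp))

theorem pvRowCount {K : List String} (hK : K.Nodup) {i : Nat} (hi : i < K.length)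
    (row : List (String × Int)) (j : Nat)
    (hnodup : (row.map Prod.fst).Nodup) (hmem : ∀ vp ∈ row, vp.1 ∈ K) :
    (row.map (fun vp => (K.idxOf vp.1, j))).count (i, j) =
      if (PySem.Dict.mk row).contains (K.getD i "") then 1 else 0 := by
  induction row with
  | nil => simp [PySem.Dict.contains_mk]
  | cons vp row ih =>
      rw [List.map_cons, List.count_cons]
      by_cases h1 : vp.1 = K.getD i ""
      · have hidx : K.idxOf vp.1 = i := by
          rw [h1, List.getD_eq_getElem K "" hi]
          exact List.Nodup.idxOf_getElem hK i hi
        have hrest : (row.map (fun vp => (K.idxOf vp.1, j))).count (i, j) = 0 := by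
          apply pvRowCount_zero_fst hK hi row
          · intro vp' hvp' h'
            have : vp.1 ∈ row.map Prod.fst := by
              rw [h1, ← h']; exact List.mem_map_of_mem hvp'
            simp only [List.map_cons, List.nodup_cons] at hnodup
            exact hnodup.1 this
          · exact fun vp' h => hmem vp' (List.mem_cons_of_mem _ h)
        rw [hrest, hidx]
        simp [PySem.Dict.contains_mk, h1]
      · have hidx : K.idxOf vp.1 ≠ i := fun h =>
          h1 (pvIdx_eq hi (hmem vp List.mem_cons_self) h)
        have := ih (by simp only [List.map_cons, List.nodup_cons] at hnodup; exact hnodup.2)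
          (fun vp' h => hmem vp' (List.mem_cons_of_mem _ h))
        have hcont : (PySem.Dict.mk (vp :: row)).contains (K.getD i "") =
            (PySem.Dict.mk row).contains (K.getD i "") := by
          rw [PySem.Dict.contains_mk, PySem.Dict.contains_mk, List.any_cons,
            beq_eq_false_iff_ne.mpr h1, Bool.false_or]
        rw [this, hcont]
        simp [Prod.ext_iff, hidx]

theorem pvPairs_count_zero {K : List String} (_hK : K.Nodup)
    (cd : List (String × List (String × Int))) {i j : Nat} (hj : j < K.length)
    (hne : ∀ p ∈ cd, p.1 ≠ K.getD j "") (hmem : ∀ p ∈ cd, p.1 ∈ K) :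
    (pvPairs K cd).count (i, j) = 0 := by
  induction cd with
  | nil => rfl
  | cons lrow cd ih =>
      rw [pvPairs, List.flatMap_cons, ← pvPairs, List.count_append]
      have hy : K.idxOf lrow.1 ≠ j := fun h =>
        hne lrow List.mem_cons_self (pvIdx_eq hj (hmem lrow List.mem_cons_self) h)
      rw [pvRowCount_zero_snd lrow.2 hy,
        ih (fun p h => hne p (List.mem_cons_of_mem _ h)) (fun p h => hmem p (List.mem_cons_of_mem _ h))]

theorem pvCount_pairs {K : List String} (hK : K.Nodup)
    (cd : List (String × List (String × Int))) {i j : Nat}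
    (hi : i < K.length) (hj : j < K.length)
    (houter : (cd.map Prod.fst).Nodup)
    (hinner : ∀ p ∈ cd, (p.2.map Prod.fst).Nodup)
    (hmem : ∀ p ∈ cd, p.1 ∈ K ∧ ∀ vp ∈ p.2, vp.1 ∈ K) :
    (pvPairs K cd).count (i, j) = pvGath cd K i j := by
  induction cd with
  | nil => rfl
  | cons lrow cd ih =>
      rw [pvPairs, List.flatMap_cons, ← pvPairs, List.count_append]
      by_cases hl : lrow.1 = K.getD j ""
      · have hidx : K.idxOf lrow.1 = j := by
          rw [hl, List.getD_eq_getElem K "" hj]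
          exact List.Nodup.idxOf_getElem hK j hj
        have hrow := pvRowCount hK hi lrow.2 j
          (hinner lrow (List.mem_cons_self)) (hmem lrow (List.mem_cons_self)).2
        have hrest : (pvPairs K cd).count (i, j) = 0 := by
          apply pvPairs_count_zero hK cd hj
          · intro p hp h
            simp only [List.map_cons, List.nodup_cons] at houter
            exact houter.1 (by rw [hl, ← h]; exact List.mem_map_of_mem hp)
          · exact fun p h => (hmem p (List.mem_cons_of_mem _ h)).1
        rw [hidx, hrow, hrest]
        unfold pvGath
        rw [show (PySem.Dict.mk (lrow :: cd)).get? (K.getD j "") = some lrow.2 by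
          rw [show (lrow : String × List (String × Int)) = (lrow.1, lrow.2) from rfl,
            PySem.Dict.get?_mk_cons]
          simp [hl]]
        simp
      · have hidx : K.idxOf lrow.1 ≠ j := fun h =>
          hl (pvIdx_eq hj (hmem lrow List.mem_cons_self).1 h)
        rw [pvRowCount_zero_snd lrow.2 hidx,
          ih (by simp only [List.map_cons, List.nodup_cons] at houter; exact houter.2)
            (fun p h => hinner p (List.mem_cons_of_mem _ h))
            (fun p h => hmem p (List.mem_cons_of_mem _ h))]
        unfold pvGath
        rw [show (lrow : String × List (String × Int)) = (lrow.1, lrow.2) from rfl,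
          PySem.Dict.get?_mk_cons]
        rw [show (lrow.1 == K.getD j "") = false by simpa using hl]
        simp

-- bridging the ports to the model -------------------------------------------------------------

theorem pvGetD_num {K : List String} {k : String} (hk : k ∈ K) :
    (PySem.Dict.mk (pvNumFrom 0 K)).getD k 0 = ((K.idxOf k : Nat) : Int) := by
  apply PySem.Dict.getD_of_get?_eq_some
  rw [pvGet?_numFrom]
  simp [hk]

theorem pvStep_eq (K : List String) {k l : String} (hk : k ∈ K) (hl : l ∈ K)
    (m : List (List Int)) :
    PySem.List.pySetD m ((PySem.Dict.mk (pvNumFrom 0 K)).getD k 0)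
      (PySem.List.pySetD (PySem.List.pyGetD m ((PySem.Dict.mk (pvNumFrom 0 K)).getD k 0) [])
        ((PySem.Dict.mk (pvNumFrom 0 K)).getD l 0)
        (PySem.List.pyGetD (PySem.List.pyGetD m ((PySem.Dict.mk (pvNumFrom 0 K)).getD k 0) [])
          ((PySem.Dict.mk (pvNumFrom 0 K)).getD l 0) 0 + 1)) =
      pvBump (K.idxOf k) (K.idxOf l) m := by
  rw [pvGetD_num hk, pvGetD_num hl]
  simp [PySem.List.pySetD_natCast, PySem.List.pyGetD_natCast, pvBump]

theorem pvScatter_eq (K : List String) (cd : List (String × List (String × Int)))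
    (m : List (List Int)) (hmem : ∀ p ∈ cd, p.1 ∈ K ∧ ∀ vp ∈ p.2, vp.1 ∈ K) :
    cd.foldl (fun m lrow =>
      lrow.2.foldl (fun m vp =>
        PySem.List.pySetD m ((PySem.Dict.mk (pvNumFrom 0 K)).getD vp.1 0)
          (PySem.List.pySetD
            (PySem.List.pyGetD m ((PySem.Dict.mk (pvNumFrom 0 K)).getD vp.1 0) [])
            ((PySem.Dict.mk (pvNumFrom 0 K)).getD lrow.1 0)
            (PySem.List.pyGetD
              (PySem.List.pyGetD m ((PySem.Dict.mk (pvNumFrom 0 K)).getD vp.1 0) [])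
              ((PySem.Dict.mk (pvNumFrom 0 K)).getD lrow.1 0) 0 + 1))) m) m =
      pvSc (pvPairs K cd) m := by
  induction cd generalizing m with
  | nil => rfl
  | cons lrow cd ih =>
      rw [List.foldl_cons, pvPairs, List.flatMap_cons, ← pvPairs, pvSc, List.foldl_append,
        ← pvSc, ← pvSc]
      have hrow : lrow.2.foldl (fun m vp =>
          PySem.List.pySetD m ((PySem.Dict.mk (pvNumFrom 0 K)).getD vp.1 0)
            (PySem.List.pySetD
              (PySem.List.pyGetD m ((PySem.Dict.mk (pvNumFrom 0 K)).getD vp.1 0) [])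
              ((PySem.Dict.mk (pvNumFrom 0 K)).getD lrow.1 0)
              (PySem.List.pyGetD
                (PySem.List.pyGetD m ((PySem.Dict.mk (pvNumFrom 0 K)).getD vp.1 0) [])
                ((PySem.Dict.mk (pvNumFrom 0 K)).getD lrow.1 0) 0 + 1))) m =
          pvSc (lrow.2.map (fun vp => (K.idxOf vp.1, K.idxOf lrow.1))) m := by
        rw [pvSc, List.foldl_map]
        apply PySem.List.foldl_congr_mem
        intro acc vp hvp
        exact pvStep_eq K ((hmem lrow List.mem_cons_self).2 vp hvp)
          (hmem lrow List.mem_cons_self).1 acc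
      rw [hrow]
      exact ih _ (fun p h => hmem p (List.mem_cons_of_mem _ h))

-- ===== VERDICT (by name: the statement is the Claim_ definition above) =====
theorem pvReplicate_getD {n : Nat} {r : List Int} {i : Nat} (hi : i < n) :
    (List.replicate n r).getD i [] = r := by
  rw [List.getD_eq_getElem _ _ (by simpa using hi), List.getElem_replicate]

theorem pvMain (cd : List (String × List (String × Int)))
    (houter : (cd.map Prod.fst).Nodup)
    (hinner : ∀ p ∈ cd, (p.2.map Prod.fst).Nodup) :
    confusion_dic_2_matrix cd = confusion_dic_2_matrix_alt cd := by
  have hK : (pvKeysOf cd).Nodup := pvKeysOf_nodup cd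
  have hmem : ∀ p ∈ cd, p.1 ∈ pvKeysOf cd ∧ ∀ vp ∈ p.2, vp.1 ∈ pvKeysOf cd := by
    intro p hp
    exact ⟨pvKeysOf_mem_outer (List.mem_map_of_mem hp),
      fun vp hv => pvKeysOf_mem_inner hp (List.mem_map_of_mem hv)⟩
  have hrange : ∀ p ∈ pvPairs (pvKeysOf cd) cd,
      p.1 < (pvKeysOf cd).length ∧ p.2 < (pvKeysOf cd).length := by
    intro p hp
    obtain ⟨lrow, hl, hp2⟩ := List.mem_flatMap.1 hp
    obtain ⟨vp, hv, hpe⟩ := List.mem_map.1 hp2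
    subst hpe
    exact ⟨List.idxOf_lt_length_of_mem ((hmem lrow hl).2 vp hv),
      List.idxOf_lt_length_of_mem (hmem lrow hl).1⟩
  have hA : confusion_dic_2_matrix cd = pvSc (pvPairs (pvKeysOf cd) cd)
      (List.replicate (pvKeysOf cd).length (List.replicate (pvKeysOf cd).length 0)) := by
    simp only [confusion_dic_2_matrix]
    rw [pvBuild_eq, pvKeys_numFrom]
    exact pvScatter_eq _ cd _ hmem
  have hB : confusion_dic_2_matrix_alt cd = (pvKeysOf cd).map (fun ki =>
      (pvKeysOf cd).map (fun kj =>
        match (PySem.Dict.mk cd).get? kj with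
        | some row => if (PySem.Dict.mk row).contains ki then (1 : Int) else 0
        | none => 0)) := by
    simp only [confusion_dic_2_matrix_alt]
    rw [pvBuild_eq, pvKeys_numFrom]
  rw [hA, hB]
  have hlen : (pvSc (pvPairs (pvKeysOf cd) cd)
      (List.replicate (pvKeysOf cd).length (List.replicate (pvKeysOf cd).length 0))).length =
      (pvKeysOf cd).length := by
    rw [pvSc_length, List.length_replicate]
  apply List.ext_getElem
  · rw [hlen, List.length_map]
  · intro i h1 h2
    have hi : i < (pvKeysOf cd).length := by rwa [hlen] at h1
    have hrowlen : ((pvSc (pvPairs (pvKeysOf cd) cd)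
        (List.replicate (pvKeysOf cd).length (List.replicate (pvKeysOf cd).length 0)))[i]).length =
        (pvKeysOf cd).length := by
      rw [← List.getD_eq_getElem _ [] h1, pvSc_row, pvReplicate_getD hi, List.length_replicate]
    apply List.ext_getElem
    · rw [hrowlen, List.getElem_map, List.length_map]
    · intro j h3 h4
      have hj : j < (pvKeysOf cd).length := by rwa [hrowlen] at h3
      have hmget : (pvSc (pvPairs (pvKeysOf cd) cd)
          (List.replicate (pvKeysOf cd).length (List.replicate (pvKeysOf cd).length 0)))[i][j] =
          pvMget (pvSc (pvPairs (pvKeysOf cd) cd)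
            (List.replicate (pvKeysOf cd).length (List.replicate (pvKeysOf cd).length 0))) i j := by
        rw [pvMget, List.getD_eq_getElem _ [] h1, List.getD_eq_getElem _ 0 h3]
      refine hmget.trans ?_
      rw [pvSc_get _ _ i j (fun p hp => ⟨by simpa using (hrange p hp).1, by
          rw [pvReplicate_getD ((hrange p hp).1)]
          simpa using (hrange p hp).2⟩),
        pvCount_pairs hK cd hi hj houter hinner hmem]
      have hz : pvMget (List.replicate (pvKeysOf cd).length
          (List.replicate (pvKeysOf cd).length (0 : Int))) i j = 0 := by
        rw [pvMget, pvReplicate_getD hi, List.getD_eq_getElem _ 0 (by simpa using hj),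
          List.getElem_replicate]
      rw [hz, zero_add]
      have hR : (List.map (fun ki => List.map (fun kj =>
          match (PySem.Dict.mk cd).get? kj with
          | some row => if (PySem.Dict.mk row).contains ki then (1 : Int) else 0
          | none => 0) (pvKeysOf cd)) (pvKeysOf cd))[i][j] =
          (match (PySem.Dict.mk cd).get? (pvKeysOf cd)[j] with
          | some row => if (PySem.Dict.mk row).contains (pvKeysOf cd)[i] then (1 : Int) else 0
          | none => 0) := by
        simp [List.getElem_map]
      rw [hR]
      unfold pvGath
      rw [List.getD_eq_getElem _ "" hj, List.getD_eq_getElem _ "" hi]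
      cases hg : (PySem.Dict.mk cd).get? (pvKeysOf cd)[j] with
      | none => simp
      | some row =>
          by_cases hc : (PySem.Dict.mk row).contains (pvKeysOf cd)[i] <;> simp [hc]

theorem confusion_dic_2_matrix_spec : Claim_equal_confusion_dic_2_matrix := by
  intro cd _dom pre
  unfold Spec_confusion_dic_2_matrix
  exact pvMain cd pre.1 pre.2
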